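-- pv_equiv track=rewrite | github.com/Bardlu023/openclaw-provider-onboarding | scripts/onboard_provider.py | choose_probe_models
-- ===== SOURCE A (Python) =====
-- def choose_probe_models(models: list[str], primary: str | None, mode: str):
--     if mode == "none" or not models:
--         return []
--     if mode == "all":
--         return list(models)
--     chosen = []
--     if primary:
--         p = primary.split("/", 1)[-1]
--         if p in models:
--             chosen.append(p)
--     families = {}
--     for m in models:
--         fam = m.split("-")[0]
--         families.setdefault(fam, m)
--     chosen.extend(families.values())
--     out = []
--     seen = set()
--     for m in chosen:
--         if m not in seen:
--             seen.add(m)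
--             out.append(m)
--     return out
-- ===== SOURCE B (Python) =====
-- def choose_probe_models(models: list[str], primary: str | None, mode: str):
--     if mode == "none" or not models:
--         return []
--     if mode == "all":
--         return list(models)
--     # sieve: take the leading model, then drop every remaining model of its family
--     res = []
--     ms = list(models)
--     while ms:
--         h = ms[0]
--         f = h.split("-")[0]
--         res.append(h)
--         ms = [x for x in ms[1:] if x.split("-")[0] != f]
--     if primary:
--         p = primary.split("/", 1)[-1]
--         if p in models:
--             res = [p] + [m for m in res if m != p]
--     return res
-- ===== Notes on version B (the rewrite author's own statement) =====
-- stated objective: alternative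
-- what changed: B replaces A's seen-set/dict pipeline (family dict setdefault pass, extend, final dedup with a seen set) by an Eratosthenes-style sieve that repeatedly takes the leading model and filters every later model of the same family out of the remaining list, then prepends the primary while filtering it out of the sieve result; no dict or set is maintained.
import Mathlib
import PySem

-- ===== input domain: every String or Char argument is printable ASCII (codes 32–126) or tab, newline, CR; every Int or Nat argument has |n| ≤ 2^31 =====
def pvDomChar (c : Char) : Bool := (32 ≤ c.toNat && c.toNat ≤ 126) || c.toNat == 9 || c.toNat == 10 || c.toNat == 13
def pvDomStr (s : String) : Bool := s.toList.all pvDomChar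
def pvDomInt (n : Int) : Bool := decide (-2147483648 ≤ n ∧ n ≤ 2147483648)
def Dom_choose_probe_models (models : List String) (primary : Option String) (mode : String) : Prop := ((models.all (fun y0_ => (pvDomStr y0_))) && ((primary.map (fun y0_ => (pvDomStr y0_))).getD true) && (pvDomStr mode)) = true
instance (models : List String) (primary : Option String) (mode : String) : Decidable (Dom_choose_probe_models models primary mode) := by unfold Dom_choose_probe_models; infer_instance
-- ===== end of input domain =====

-- B replaces A's dict/seen-set pipeline by a sieve that repeatedly takes the leading model and
-- filters every later model of the same family out of the remaining list; objective: alternative.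

-- shared helpers (both Pythons compute these the same way):
-- m.split("-")[0]
def pvFam (m : String) : String := ((PySem.Str.split? m "-").getD []).headD ""
-- pr.split("/", 1)[-1]  (the split list is always nonempty, so the .getD "" default never fires)
def pvLastPart (pr : String) : String :=
  (PySem.List.pyGet? ((PySem.Str.splitMax? pr "/" 1).getD []) (-1)).getD ""

-- ===== PORT A =====
def choose_probe_models (models : List String) (primary : Option String) (mode : String) : List String :=
  if mode = "none" ∨ models = [] then []
  else if mode = "all" then models
  else
    let chosen : List String :=
      match primary with
      | some pr =>
        if pr ≠ "" then
          let p := pvLastPart pr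
          if models.contains p then [p] else []
        else []
      | none => []
    let families : PySem.Dict String String :=
      models.foldl (fun d m => d.setdefault (pvFam m) m) PySem.Dict.empty
    let chosen := chosen ++ families.values
    (chosen.foldl
      (fun (st : List String × PySem.Set String) m =>
        if PySem.Set.contains st.2 m then st
        else (st.1 ++ [m], PySem.Set.add st.2 m))
      ([], PySem.Set.empty)).1

-- ===== PORT B =====
-- Source B's while loop over the shrinking list `ms`, as the obvious recursion on that list
def pvSieve : List String → List String
  | [] => []
  | h :: t => h :: pvSieve (t.filter (fun x => pvFam x ≠ pvFam h))
termination_by l => l.length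
decreasing_by
  simp only [List.length_cons, List.length_unattach]
  exact Nat.lt_succ_of_le (le_trans (List.length_filter_le _ _) (by simp))

def choose_probe_models_alt (models : List String) (primary : Option String) (mode : String) : List String :=
  if mode = "none" ∨ models = [] then []
  else if mode = "all" then models
  else
    let res := pvSieve models
    match primary with
    | some pr =>
      if pr ≠ "" then
        let p := pvLastPart pr
        if models.contains p then p :: res.filter (fun m => m ≠ p) else res
      else res
    | none => res

-- ===== PRECONDITION & SPEC =====
def Spec_choose_probe_models (models : List String) (primary : Option String) (mode : String) (out : List String) : Prop := out = choose_probe_models_alt models primary mode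
instance (models : List String) (primary : Option String) (mode : String) (out : List String) : Decidable (Spec_choose_probe_models models primary mode out) := by unfold Spec_choose_probe_models; infer_instance

-- ===== CLAIM (what is proved, stated in full; the proofs are below) =====
def Claim_equal_choose_probe_models : Prop := ∀ (models : List String) (primary : Option String) (mode : String), Dom_choose_probe_models models primary mode → Spec_choose_probe_models models primary mode (choose_probe_models models primary mode)

-- ===== LEMMAS AND PROOFS =====

-- first element of each family, in order of first family occurrence (= families.values)
def pvFirsts (sf : PySem.Set String) : List String → List String
  | [] => []
  | m :: ms =>
    if PySem.Set.contains sf (pvFam m) then pvFirsts sf ms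
    else m :: pvFirsts (PySem.Set.add sf (pvFam m)) ms

-- A's dedup pass, as a function of the seen-set
def pvDD (seen : PySem.Set String) : List String → List String
  | [] => []
  | m :: ms =>
    if PySem.Set.contains seen m then pvDD seen ms
    else m :: pvDD (PySem.Set.add seen m) ms

def pvAStep (st : List String × PySem.Set String) (m : String) :
    List String × PySem.Set String :=
  if PySem.Set.contains st.2 m then st else (st.1 ++ [m], PySem.Set.add st.2 m)

theorem pvA_foldl_step (xs : List String) (out : List String) (seen : PySem.Set String) :
    (xs.foldl pvAStep (out, seen)).1 = out ++ pvDD seen xs := by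
  induction xs generalizing out seen with
  | nil => simp [pvDD]
  | cons m ms ih =>
    rw [List.foldl_cons]
    by_cases h : m ∈ seen
    · have hst : pvAStep (out, seen) m = (out, seen) := by simp [pvAStep, h]
      rw [hst, ih]
      simp [pvDD, h]
    · have hst : pvAStep (out, seen) m = (out ++ [m], PySem.Set.add seen m) := by
        simp [pvAStep, h]
      rw [hst, ih]
      simp [pvDD, h]

theorem pvA_foldl (xs : List String) (out : List String) (seen : PySem.Set String) :
    (xs.foldl
      (fun (st : List String × PySem.Set String) m =>
        if PySem.Set.contains st.2 m then st
        else (st.1 ++ [m], PySem.Set.add st.2 m))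
      (out, seen)).1 = out ++ pvDD seen xs :=
  pvA_foldl_step xs out seen

theorem pvFamilies_values (xs : List String) (d : PySem.Dict String String) :
    (xs.foldl (fun d m => d.setdefault (pvFam m) m) d).values
      = d.values ++ pvFirsts d.keys xs := by
  induction xs generalizing d with
  | nil => simp [pvFirsts]
  | cons m ms ih =>
    simp only [List.foldl_cons, pvFirsts]
    by_cases h : pvFam m ∈ d.keys
    · have hc : d.contains (pvFam m) = true :=
        (PySem.Dict.contains_iff_mem_keys d (pvFam m)).2 h
      rw [PySem.Dict.setdefault_of_contains d m hc, ih]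
      simp [PySem.Set.contains, h]
    · have hc : d.contains (pvFam m) = false := by
        simp only [Bool.eq_false_iff]
        exact fun hx => h ((PySem.Dict.contains_iff_mem_keys d (pvFam m)).1 hx)
      rw [PySem.Dict.setdefault_of_not_contains d m hc, ih]
      have hv : (d.insert (pvFam m) m).values = d.values ++ [m] := by
        simp [PySem.Dict.values, PySem.Dict.items_insert_of_not_contains d m hc]
      have hks : (d.insert (pvFam m) m).keys = d.keys ++ [pvFam m] :=
        PySem.Dict.keys_insert_of_not_contains d m hc
      rw [hv, hks]
      simp [PySem.Set.add, h]

-- every element kept by pvFirsts has a family outside the starting set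
theorem pvFirsts_fam_not_mem (xs : List String) (sf : PySem.Set String) :
    ∀ x ∈ pvFirsts sf xs, pvFam x ∉ sf := by
  induction xs generalizing sf with
  | nil => simp [pvFirsts]
  | cons m ms ih =>
    intro x hx
    by_cases h : pvFam m ∈ sf
    · simp only [pvFirsts] at hx
      rw [if_pos (by simp [PySem.Set.contains, h])] at hx
      exact ih sf x hx
    · simp only [pvFirsts] at hx
      rw [if_neg (by simp [PySem.Set.contains, h])] at hx
      rcases List.mem_cons.1 hx with rfl | hx'
      · exact h
      · intro hmem
        exact ih (PySem.Set.add sf (pvFam m)) x hx'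
          (by simp [PySem.Set.add, PySem.Set.contains, h]; exact Or.inl hmem)

-- the family firsts are pairwise distinct strings (equal strings share a family)
theorem pvFirsts_nodup (xs : List String) (sf : PySem.Set String) :
    (pvFirsts sf xs).Nodup := by
  induction xs generalizing sf with
  | nil => simp [pvFirsts]
  | cons m ms ih =>
    by_cases h : pvFam m ∈ sf
    · simpa [pvFirsts, h] using ih sf
    · have hnot : m ∉ pvFirsts (PySem.Set.add sf (pvFam m)) ms := fun hmem =>
        pvFirsts_fam_not_mem ms _ m hmem (by simp [PySem.Set.add, PySem.Set.contains, h])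
      simp only [pvFirsts]
      rw [if_neg (by simp [PySem.Set.contains, h])]
      exact List.nodup_cons.2 ⟨hnot, ih _⟩

-- on a duplicate-free list A's dedup pass is a plain filter against the seen-set
theorem pvDD_of_nodup (xs : List String) (seen : PySem.Set String) (h : xs.Nodup) :
    pvDD seen xs = xs.filter (fun m => !(PySem.Set.contains seen m)) := by
  induction xs generalizing seen with
  | nil => simp [pvDD]
  | cons m ms ih =>
    rcases List.nodup_cons.1 h with ⟨hm, hms⟩
    by_cases hseen : m ∈ seen
    · simp [pvDD, hseen, ih seen hms]
    · simp only [pvDD, List.filter_cons]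
      rw [if_neg (by simp [PySem.Set.contains, hseen])]
      rw [ih (PySem.Set.add seen m) hms,
        if_pos (show (!(PySem.Set.contains seen m)) = true by simp [PySem.Set.contains, hseen])]
      refine congrArg (m :: ·) (List.filter_congr fun x hx => ?_)
      have hxm : x ≠ m := fun e => hm (e ▸ hx)
      simp [PySem.Set.add, PySem.Set.contains, hseen, hxm]

-- the sieve on a pre-filtered list computes the family firsts
theorem pvSieve_filter (xs : List String) (sf : PySem.Set String) :
    pvSieve (xs.filter (fun x => !(PySem.Set.contains sf (pvFam x)))) = pvFirsts sf xs := by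
  induction xs generalizing sf with
  | nil => simp [pvSieve, pvFirsts]
  | cons m ms ih =>
    simp only [List.filter_cons, pvFirsts]
    by_cases h : pvFam m ∈ sf
    · rw [if_neg (by simp [PySem.Set.contains, h]), if_pos (by simp [PySem.Set.contains, h])]
      exact ih sf
    · rw [if_pos (by simp [PySem.Set.contains, h]), if_neg (by simp [PySem.Set.contains, h])]
      simp only [pvSieve, List.filter_filter]
      have hflt : (List.filter (fun x => decide (pvFam x ≠ pvFam m) && !(PySem.Set.contains sf (pvFam x))) ms)
          = ms.filter (fun x => !(PySem.Set.contains (PySem.Set.add sf (pvFam m)) (pvFam x))) := by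
        refine List.filter_congr (fun x _ => ?_)
        by_cases hx : pvFam x ∈ sf
        · simp [PySem.Set.contains, hx, PySem.Set.add, h]
        · by_cases hxm : pvFam x = pvFam m
          · simp [PySem.Set.contains, hxm, PySem.Set.add, h]
          · simp [PySem.Set.contains, hx, hxm, PySem.Set.add, h]
      rw [hflt, ih (PySem.Set.add sf (pvFam m))]

-- the sieve over the whole list = the family firsts from the empty set
theorem pvSieve_eq_firsts (xs : List String) :
    pvSieve xs = pvFirsts PySem.Set.empty xs := by
  have h := pvSieve_filter xs PySem.Set.empty
  simpa [PySem.Set.contains, PySem.Set.empty] using h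

-- ===== VERDICT (by name: the statement is the Claim_ definition above) =====
theorem choose_probe_models_spec : Claim_equal_choose_probe_models := by
  intro models primary mode _
  unfold Spec_choose_probe_models choose_probe_models choose_probe_models_alt
  by_cases h1 : mode = "none" ∨ models = []
  · simp [h1]
  · simp only [if_neg h1]
    by_cases h2 : mode = "all"
    · simp [h2]
    · simp only [if_neg h2]
      have hkeys : (PySem.Dict.empty : PySem.Dict String String).keys = PySem.Set.empty := rfl
      have hvals : (PySem.Dict.empty : PySem.Dict String String).values = [] := rfl
      have hfd := pvFamilies_values models (PySem.Dict.empty)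
      rw [hkeys, hvals] at hfd
      have hnd : (pvFirsts PySem.Set.empty models).Nodup := pvFirsts_nodup models _
      have hdd := pvDD_of_nodup (pvFirsts PySem.Set.empty models) PySem.Set.empty hnd
      rcases primary with _ | pr
      · rw [pvA_foldl, hfd, pvSieve_eq_firsts]
        simp only [List.nil_append]
        rw [hdd]
        simp [PySem.Set.contains, PySem.Set.empty]
      · by_cases hpr : pr = ""
        · simp only [hpr]
          rw [pvA_foldl, hfd, pvSieve_eq_firsts]
          simp only [List.nil_append, ne_eq, not_true_eq_false, if_false]
          rw [hdd]
          simp [PySem.Set.contains, PySem.Set.empty]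
        · simp only [ne_eq, hpr, not_false_eq_true, if_true]
          by_cases hin : models.contains (pvLastPart pr)
          · simp only [hin, if_true]
            rw [pvA_foldl, hfd, pvSieve_eq_firsts]
            simp only [List.nil_append, List.singleton_append, pvDD]
            rw [if_neg (by simp [PySem.Set.contains, PySem.Set.empty])]
            have hdd2 := pvDD_of_nodup (pvFirsts PySem.Set.empty models)
              (PySem.Set.add PySem.Set.empty (pvLastPart pr)) hnd
            rw [hdd2]
            refine congrArg (pvLastPart pr :: ·) (List.filter_congr fun x _ => ?_)
            simp [PySem.Set.add, PySem.Set.contains, PySem.Set.empty]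
          · simp only [hin]
            rw [pvA_foldl, hfd, pvSieve_eq_firsts]
            simp only [List.nil_append, Bool.false_eq_true, if_false]
            rw [hdd]
            simp [PySem.Set.contains, PySem.Set.empty]
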